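-- pv_equiv track=rewrite | github.com/slatex/stextools | stextools/stepper/interface.py | _get_lines_around
-- ===== SOURCE A (Python) =====
-- def _get_lines_around(text: str, start: int, end: int, n_lines: int = 7) -> tuple[str, str, str, int]:
--     """
--     returns
--       - the n_lines lines before the start index
--       - the text between the start and end index
--       - the n_lines lines after the end index
--       - the line number of the start index
--     """
--     start_index = start
--     if not 0 <= start <= end < len(text):
--         raise ValueError(f"Invalid start/end: {start}/{end} for text of length {len(text)}")
--
--     for _ in range(n_lines):
--         if start_index > 0:
--             start_index -= 1
--         while start_index > 0 and text[start_index - 1] != '\n':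
--             start_index -= 1
--
--     end_index = end
--     for _ in range(n_lines):
--         if end_index + 1 < len(text):
--             end_index += 1
--         while end_index + 1 < len(text) and text[end_index + 1] != '\n':
--             end_index += 1
--     end_index += 1
--
--     return text[start_index:start], text[start:end], text[end:end_index], text[:start_index].count('\n') + 1
-- ===== SOURCE B (Python) =====
-- def _bisect_left(a, x):
--     # binary search, same algorithm as the standard bisect.bisect_left
--     lo, hi = 0, len(a)
--     while lo < hi:
--         mid = (lo + hi) // 2
--         if a[mid] < x:
--             lo = mid + 1
--         else:
--             hi = mid
--     return lo
--
--
-- def _bisect_right(a, x):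
--     lo, hi = 0, len(a)
--     while lo < hi:
--         mid = (lo + hi) // 2
--         if x < a[mid]:
--             hi = mid
--         else:
--             lo = mid + 1
--     return lo
--
--
-- def _get_lines_around(text: str, start: int, end: int, n_lines: int = 7) -> tuple[str, str, str, int]:
--     if not 0 <= start <= end < len(text):
--         raise ValueError(f"Invalid start/end: {start}/{end} for text of length {len(text)}")
--
--     # one pass over the text: the positions of all newlines
--     nls = [i for i, c in enumerate(text) if c == '\n']
--     # line-start positions: 0 and every position just after a newline
--     starts = [0] + [i + 1 for i in nls]
--
--     if n_lines <= 0: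
--         start_index = start
--         end_index = end + 1
--     else:
--         # backward: the start of the line containing start-1, stepped back n_lines-1 further lines
--         if start == 0:
--             start_index = 0
--         else:
--             j0 = _bisect_right(starts, start - 1) - 1
--             start_index = starts[max(0, j0 - (n_lines - 1))]
--         # forward: the newline reached after n_lines forward steps from end (or the end of text)
--         k = _bisect_left(nls, end + 2) + n_lines - 1
--         end_index = nls[k] if k < len(nls) else len(text)
--
--     line_no = _bisect_left(nls, start_index) + 1
--     return text[start_index:start], text[start:end], text[end:end_index], line_no
-- ===== Notes on version B (the rewrite author's own statement) =====
-- stated objective: alternative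
-- what changed: Replaces the n_lines nested backward/forward character-scan loops by a one-pass precomputation of newline positions plus direct binary-search (bisect) index arithmetic on the line-start table, and the prefix newline count by a bisect into that table.
import Mathlib
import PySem

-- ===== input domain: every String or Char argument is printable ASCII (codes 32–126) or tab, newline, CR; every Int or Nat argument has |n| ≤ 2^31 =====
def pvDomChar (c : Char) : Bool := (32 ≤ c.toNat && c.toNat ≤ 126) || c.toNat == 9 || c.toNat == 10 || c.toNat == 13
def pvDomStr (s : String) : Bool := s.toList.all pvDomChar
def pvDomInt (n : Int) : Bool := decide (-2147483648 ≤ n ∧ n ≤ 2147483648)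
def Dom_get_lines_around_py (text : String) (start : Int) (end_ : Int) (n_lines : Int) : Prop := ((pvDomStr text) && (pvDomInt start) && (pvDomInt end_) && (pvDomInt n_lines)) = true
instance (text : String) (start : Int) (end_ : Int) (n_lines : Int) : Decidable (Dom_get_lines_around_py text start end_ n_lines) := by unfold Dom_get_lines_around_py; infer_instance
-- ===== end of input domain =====

-- B replaces A's n_lines nested character-scan loops by a precomputed newline-position
-- table with binary-search index arithmetic (objective: alternative algorithm, same cost class).

-- ===== PORT A =====
-- inner `while start_index > 0 and text[start_index - 1] != '\n': start_index -= 1`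
def pvBackLine (cs : List Char) : Nat → Nat
  | 0 => 0
  | k + 1 => if cs.getD k ' ' ≠ '\n' then pvBackLine cs k else k + 1

-- one iteration of A's first `for _ in range(n_lines)` body
def pvStepB (cs : List Char) (i : Nat) : Nat :=
  pvBackLine cs (if 0 < i then i - 1 else i)

-- inner `while end_index + 1 < len(text) and text[end_index + 1] != '\n': end_index += 1`
def pvFwdLine (cs : List Char) (j : Nat) : Nat :=
  if j + 1 < cs.length ∧ cs.getD (j + 1) ' ' ≠ '\n' then pvFwdLine cs (j + 1) else j
  termination_by cs.length - j
  decreasing_by omega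

-- one iteration of A's second `for _ in range(n_lines)` body
def pvStepF (cs : List Char) (j : Nat) : Nat :=
  if j + 1 < cs.length then pvFwdLine cs (j + 1) else j

def get_lines_around_py (text : String) (start : Int) (end_ : Int) (n_lines : Int) : String × String × String × Int :=
  let cs := text.toList
  if 0 ≤ start ∧ start ≤ end_ ∧ end_ < (cs.length : Int) then
    let si : Nat := (PySem.List.pyRange 0 n_lines 1).foldl (fun i _ => pvStepB cs i) start.toNat
    let ei : Nat := (PySem.List.pyRange 0 n_lines 1).foldl (fun j _ => pvStepF cs j) end_.toNat + 1
    (String.ofList (PySem.List.slice cs (some (si : Int)) (some start)),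
     String.ofList (PySem.List.slice cs (some start) (some end_)),
     String.ofList (PySem.List.slice cs (some end_) (some (ei : Int))),
     -- text[:start_index].count('\n'): a single-character needle, so str.count = character count (exact)
     ((PySem.List.slice cs none (some (si : Int))).count '\n' : Int) + 1)
  else ("", "", "", 0)  -- Python raises ValueError here; excluded by Pre_

-- ===== PORT B =====
-- [i for i, c in enumerate(text) if c == '\n']
def pvNls (cs : List Char) : List Int :=
  (PySem.List.enumerate cs 0).filterMap (fun p => if p.2 = '\n' then some p.1 else none)

-- starts = [0] + [i + 1 for i in nls]
def pvStarts (cs : List Char) : List Int :=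
  0 :: (pvNls cs).map (· + 1)

def get_lines_around_py_alt (text : String) (start : Int) (end_ : Int) (n_lines : Int) : String × String × String × Int :=
  let cs := text.toList
  if 0 ≤ start ∧ start ≤ end_ ∧ end_ < (cs.length : Int) then
    let nls := pvNls cs
    let starts := pvStarts cs
    let si : Int :=
      if n_lines ≤ 0 then start
      else if start = 0 then 0
      -- Source B's hand-written _bisect_right is CPython's bisect loop, ported as PySem.List.bisectRight
      else starts.getD ((PySem.List.bisectRight starts (start - 1) - 1) - (n_lines.toNat - 1)) 0
    let ei : Int :=
      if n_lines ≤ 0 then end_ + 1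
      else
        let k := PySem.List.bisectLeft nls (end_ + 2) + n_lines.toNat - 1
        if k < nls.length then nls.getD k 0 else (cs.length : Int)
    (String.ofList (PySem.List.slice cs (some si) (some start)),
     String.ofList (PySem.List.slice cs (some start) (some end_)),
     String.ofList (PySem.List.slice cs (some end_) (some ei)),
     (PySem.List.bisectLeft nls si : Int) + 1)
  else ("", "", "", 0)  -- same ValueError guard as A

-- ===== PRECONDITION & SPEC =====
-- Pre_ excludes exactly the inputs on which A raises ValueError (B raises it there too).
def Pre_get_lines_around_py (text : String) (start : Int) (end_ : Int) (n_lines : Int) : Prop :=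
  0 ≤ start ∧ start ≤ end_ ∧ end_ < PySem.Str.len text
instance (text : String) (start : Int) (end_ : Int) (n_lines : Int) : Decidable (Pre_get_lines_around_py text start end_ n_lines) := by unfold Pre_get_lines_around_py; infer_instance

def pvWitness_get_lines_around_py : String × Int × Int × Int := ("ab\ncd", 1, 3, 1)

def Spec_get_lines_around_py (text : String) (start : Int) (end_ : Int) (n_lines : Int) (out : String × String × String × Int) : Prop := out = get_lines_around_py_alt text start end_ n_lines
instance (text : String) (start : Int) (end_ : Int) (n_lines : Int) (out : String × String × String × Int) : Decidable (Spec_get_lines_around_py text start end_ n_lines out) := by unfold Spec_get_lines_around_py; infer_instance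

-- ===== CLAIM (what is proved, stated in full; the proofs are below) =====
def Claim_equal_get_lines_around_py : Prop := ∀ (text : String) (start : Int) (end_ : Int) (n_lines : Int), Dom_get_lines_around_py text start end_ n_lines → Pre_get_lines_around_py text start end_ n_lines → Spec_get_lines_around_py text start end_ n_lines (get_lines_around_py text start end_ n_lines)

-- ===== LEMMAS AND PROOFS =====

-- membership in the newline table
theorem pvNls_mem (cs : List Char) (x : Int) :
    x ∈ pvNls cs ↔ 0 ≤ x ∧ x < (cs.length : Int) ∧ cs.getD x.toNat ' ' = '\n' := by
  unfold pvNls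
  rw [List.mem_filterMap]
  constructor
  · rintro ⟨p, hp, hf⟩
    rw [PySem.List.mem_enumerate_iff] at hp
    obtain ⟨k, hk, rfl⟩ := hp
    split_ifs at hf with h
    · have hx : (k : Int) = x := by simpa using hf
      refine ⟨by omega, by exact_mod_cast hx ▸ Int.ofNat_lt.mpr hk, ?_⟩
      rw [← hx]
      simp only [Int.toNat_natCast]
      rw [List.getD_eq_getElem cs ' ' hk]
      exact h
  · rintro ⟨h0, hlt, hc⟩
    have hk : x.toNat < cs.length := by omega
    refine ⟨((x.toNat : Int), cs[x.toNat]), ?_, ?_⟩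
    · rw [PySem.List.mem_enumerate_iff]
      exact ⟨x.toNat, hk, by simp⟩
    · have hx : cs[x.toNat] = '\n' := by rw [← List.getD_eq_getElem cs ' ' hk]; exact hc
      show (if cs[x.toNat] = '\n' then some ((x.toNat : Int)) else none) = some x
      rw [if_pos hx]
      simp only [Option.some.injEq]
      omega

theorem pvNls_sorted (cs : List Char) : List.Pairwise (· < ·) (pvNls cs) := by
  unfold pvNls
  refine List.Pairwise.filterMap _ ?_ (PySem.List.pairwise_lt_enumerate cs 0)
  intro a a' hlt b hb b' hb'
  split_ifs at hb hb' with h1 h2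
  cases hb; cases hb'; exact hlt

theorem pvStarts_sorted (cs : List Char) : List.Pairwise (· < ·) (pvStarts cs) := by
  unfold pvStarts
  refine List.pairwise_cons.mpr ⟨?_, ?_⟩
  · intro y hy
    obtain ⟨z, hz, rfl⟩ := List.mem_map.mp hy
    have := (pvNls_mem cs z).mp hz
    omega
  · exact List.Pairwise.map _ (fun a b h => by omega) (pvNls_sorted cs)

theorem pvStarts_mem (cs : List Char) (x : Int) :
    x ∈ pvStarts cs ↔ x = 0 ∨ (x - 1) ∈ pvNls cs := by
  unfold pvStarts
  simp only [List.mem_cons, List.mem_map]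
  constructor
  · rintro (rfl | ⟨z, hz, rfl⟩)
    · exact Or.inl rfl
    · exact Or.inr (by simpa using hz)
  · rintro (rfl | h)
    · exact Or.inl rfl
    · exact Or.inr ⟨x - 1, h, by ring⟩

theorem pvStarts_nonneg (cs : List Char) (x : Int) (hx : x ∈ pvStarts cs) : 0 ≤ x := by
  rcases (pvStarts_mem cs x).mp hx with rfl | h
  · exact le_refl 0
  · have := (pvNls_mem cs (x - 1)).mp h
    omega

-- uniqueness characterisations of the two bisection searches on a sorted list
theorem bisectLeft_eq_of (xs : List Int) (x : Int) (i : Nat)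
    (hs : List.Pairwise (· ≤ ·) xs) (hi : i ≤ xs.length)
    (h1 : ∀ j (hj : j < xs.length), j < i → xs[j] < x)
    (h2 : ∀ j (hj : j < xs.length), i ≤ j → x ≤ xs[j]) :
    PySem.List.bisectLeft xs x = i := by
  obtain ⟨hle, hlo, hhi⟩ := PySem.List.bisectLeft_spec xs x hs
  rcases lt_trichotomy (PySem.List.bisectLeft xs x) i with h | h | h
  · have hb : PySem.List.bisectLeft xs x < xs.length := lt_of_lt_of_le h hi
    have := h1 _ hb h
    have := hhi _ hb le_rfl
    omega
  · exact h
  · have hi' : i < xs.length := lt_of_lt_of_le h hle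
    have := hlo _ hi' h
    have := h2 _ hi' le_rfl
    omega

theorem pvMonoLe (xs : List Int) (hs : List.Pairwise (· ≤ ·) xs) {u v : Nat} (huv : u ≤ v)
    (hv : v < xs.length) : xs[u]'(lt_of_le_of_lt huv hv) ≤ xs[v] := by
  rcases eq_or_lt_of_le huv with rfl | h
  · exact le_refl _
  · exact List.pairwise_iff_getElem.mp hs u v _ hv h

theorem bisectLeft_of_mem (xs : List Int) (hs : List.Pairwise (· < ·) xs) (v : Int) (hv : v ∈ xs) :
    PySem.List.bisectLeft xs v < xs.length ∧ xs.getD (PySem.List.bisectLeft xs v) 0 = v := by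
  have hs' := hs.imp (fun h => le_of_lt h)
  obtain ⟨hle, hlo, hhi⟩ := PySem.List.bisectLeft_spec xs v hs'
  obtain ⟨t, ht, hvt⟩ := List.mem_iff_getElem.mp hv
  have hbt : PySem.List.bisectLeft xs v ≤ t := by
    by_contra hcon
    have := hlo t ht (by omega)
    omega
  have hblen : PySem.List.bisectLeft xs v < xs.length := lt_of_le_of_lt hbt ht
  refine ⟨hblen, ?_⟩
  rw [List.getD_eq_getElem xs 0 hblen]
  have h1 : xs[PySem.List.bisectLeft xs v] ≤ v := by
    have := pvMonoLe xs hs' hbt ht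
    omega
  have h2 := hhi _ hblen le_rfl
  omega

theorem bisectLeft_all_lt (xs : List Int) (hs : List.Pairwise (· ≤ ·) xs) (x : Int)
    (h : ∀ y ∈ xs, y < x) : PySem.List.bisectLeft xs x = xs.length := by
  apply bisectLeft_eq_of xs x xs.length hs le_rfl
  · intro j hj _
    exact h _ (List.getElem_mem hj)
  · intro j hj hlen
    omega

theorem bisectLeft_succ_not_mem (xs : List Int) (hs : List.Pairwise (· < ·) xs) (x : Int)
    (hx : x ∉ xs) : PySem.List.bisectLeft xs (x + 1) = PySem.List.bisectLeft xs x := by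
  have hs' := hs.imp (fun h => le_of_lt h)
  obtain ⟨hle, hlo, hhi⟩ := PySem.List.bisectLeft_spec xs x hs'
  apply bisectLeft_eq_of xs (x + 1) _ hs' hle
  · intro j hj hjb
    have := hlo j hj hjb
    omega
  · intro j hj hbj
    have h1 := hhi j hj hbj
    have h2 : xs[j] ≠ x := fun he => hx (he ▸ List.getElem_mem hj)
    omega

theorem bisectLeft_getD_succ (xs : List Int) (hs : List.Pairwise (· < ·) xs) (k : Nat)
    (hk : k < xs.length) : PySem.List.bisectLeft xs (xs.getD k 0 + 1) = k + 1 := by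
  have hs' := hs.imp (fun h => le_of_lt h)
  rw [List.getD_eq_getElem xs 0 hk]
  apply bisectLeft_eq_of xs _ (k + 1) hs' (by omega)
  · intro j hj hjk
    have : xs[j] ≤ xs[k] := pvMonoLe xs hs' (by omega) hk
    omega
  · intro j hj hkj
    have : xs[k] < xs[j] := List.pairwise_iff_getElem.mp hs k j hk hj (by omega)
    omega

-- the greatest element ≤ x is unique
theorem pvMaxLE_unique (xs : List Int) (x v w : Int)
    (hv : v ∈ xs ∧ v ≤ x ∧ ∀ y ∈ xs, y ≤ x → y ≤ v)
    (hw : w ∈ xs ∧ w ≤ x ∧ ∀ y ∈ xs, y ≤ x → y ≤ w) : v = w :=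
  le_antisymm (hw.2.2 v hv.1 hv.2.1) (hv.2.2 w hw.1 hw.2.1)

-- A's inner backward scan finds the greatest line start ≤ k
theorem pvBackLine_maxLE (cs : List Char) (k : Nat) :
    ((pvBackLine cs k : Nat) : Int) ∈ pvStarts cs ∧ ((pvBackLine cs k : Nat) : Int) ≤ (k : Int) ∧
      ∀ y ∈ pvStarts cs, y ≤ (k : Int) → y ≤ ((pvBackLine cs k : Nat) : Int) := by
  induction k with
  | zero =>
    refine ⟨?_, by simp [pvBackLine], ?_⟩
    · simpa [pvBackLine] using (pvStarts_mem cs 0).mpr (Or.inl rfl)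
    · intro y hy hy0
      have := pvStarts_nonneg cs y hy
      simp only [pvBackLine]
      omega
  | succ k ih =>
    by_cases hc : cs.getD k ' ' ≠ '\n'
    · have hval : pvBackLine cs (k + 1) = pvBackLine cs k := by
        simp only [pvBackLine, if_pos hc]
      rw [hval]
      obtain ⟨h1, h2, h3⟩ := ih
      refine ⟨h1, by push_cast; omega, ?_⟩
      intro y hy hyk
      by_cases hyk' : y ≤ (k : Int)
      · exact h3 y hy hyk'
      · exfalso
        have hy1 : y = (k : Int) + 1 := by push_cast at hyk; omega
        have hm : ((k : Nat) : Int) ∈ pvNls cs := by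
          rcases (pvStarts_mem cs y).mp hy with h0 | h
          · omega
          · rw [hy1] at h
            simpa using h
        have := (pvNls_mem cs _).mp hm
        rw [Int.toNat_natCast] at this
        exact hc this.2.2
    · rw [not_not] at hc
      have hval : pvBackLine cs (k + 1) = k + 1 := by
        simp only [pvBackLine, if_neg (not_not.mpr hc)]
      rw [hval]
      have hklen : k < cs.length := by
        by_contra hcon
        rw [List.getD_eq_default _ _ (by omega)] at hc
        exact absurd hc (by decide)
      refine ⟨?_, by push_cast; omega, ?_⟩
      · apply (pvStarts_mem cs _).mpr
        right
        have hm : ((k : Nat) : Int) ∈ pvNls cs :=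
          (pvNls_mem cs _).mpr ⟨by omega, by exact_mod_cast hklen, by simpa using hc⟩
        have : ((k + 1 : Nat) : Int) - 1 = ((k : Nat) : Int) := by push_cast; ring
        rw [this]
        exact hm
      · intro y hy hyk
        push_cast
        push_cast at hyk
        omega

-- B's backward bisection finds the same greatest line start ≤ x
theorem pvBR_maxLE (xs : List Int) (hs : List.Pairwise (· < ·) xs) (x : Int)
    (hmem : ∃ y ∈ xs, y ≤ x) :
    PySem.List.bisectRight xs x - 1 < xs.length ∧
      (xs.getD (PySem.List.bisectRight xs x - 1) 0 ∈ xs ∧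
       xs.getD (PySem.List.bisectRight xs x - 1) 0 ≤ x ∧
       ∀ y ∈ xs, y ≤ x → y ≤ xs.getD (PySem.List.bisectRight xs x - 1) 0) := by
  have hs' := hs.imp (fun h => le_of_lt h)
  obtain ⟨hle, hlo, hhi⟩ := PySem.List.bisectRight_spec xs x hs'
  obtain ⟨y, hy, hyx⟩ := hmem
  obtain ⟨t, ht, hvt⟩ := List.mem_iff_getElem.mp hy
  have hr1 : 1 ≤ PySem.List.bisectRight xs x := by
    by_contra hcon
    have := hhi t ht (by omega)
    rw [hvt] at this
    omega
  have hj0 : PySem.List.bisectRight xs x - 1 < xs.length := by omega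
  rw [List.getD_eq_getElem xs 0 hj0]
  refine ⟨hj0, List.getElem_mem hj0, hlo _ hj0 (by omega), ?_⟩
  intro z hz hzx
  obtain ⟨u, hu, huz⟩ := List.mem_iff_getElem.mp hz
  have hur : u < PySem.List.bisectRight xs x := by
    by_contra hcon
    have := hhi u hu (by omega)
    rw [huz] at this
    omega
  have := pvMonoLe xs hs' (show u ≤ PySem.List.bisectRight xs x - 1 by omega) hj0
  omega

-- one backward step from a line start is the previous line start
theorem pvStepB_starts (cs : List Char) (j : Nat) (hj : j < (pvStarts cs).length) :
    ((pvStepB cs ((pvStarts cs).getD j 0).toNat : Nat) : Int) = (pvStarts cs).getD (j - 1) 0 := by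
  match j with
  | 0 =>
    simp [pvStarts, pvStepB, pvBackLine]
  | Nat.succ t =>
    have hsorted := pvStarts_sorted cs
    have hs' := hsorted.imp (fun h => le_of_lt h)
    have hv : (pvStarts cs).getD (t + 1) 0 = (pvStarts cs)[t + 1] := List.getD_eq_getElem _ 0 hj
    have h0 : (pvStarts cs)[0]'(by omega) = 0 := rfl
    have hvpos : 1 ≤ (pvStarts cs)[t + 1] := by
      have := List.pairwise_iff_getElem.mp hsorted 0 (t + 1) (by omega) hj (by omega)
      omega
    have hstep : pvStepB cs ((pvStarts cs)[t + 1]).toNat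
        = pvBackLine cs (((pvStarts cs)[t + 1]).toNat - 1) := by
      unfold pvStepB
      rw [if_pos (by omega)]
    rw [hv, hstep]
    have hbl := pvBackLine_maxLE cs (((pvStarts cs)[t + 1]).toNat - 1)
    have hcast : (((((pvStarts cs)[t + 1]).toNat - 1 : Nat)) : Int) = (pvStarts cs)[t + 1] - 1 := by
      omega
    rw [hcast] at hbl
    have htgt : (pvStarts cs).getD (t + 1 - 1) 0 = (pvStarts cs)[t]'(by omega) :=
      List.getD_eq_getElem _ 0 (by omega)
    rw [htgt]
    refine (pvMaxLE_unique (pvStarts cs) ((pvStarts cs)[t + 1] - 1) _ _ hbl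
      ⟨List.getElem_mem (by omega), ?_, ?_⟩)
    · have := List.pairwise_iff_getElem.mp hsorted t (t + 1) (by omega) hj (by omega)
      omega
    · intro y hy hyv
      obtain ⟨u, hu, huy⟩ := List.mem_iff_getElem.mp hy
      have hut : u ≤ t := by
        by_contra hcon
        have hmono := pvMonoLe (pvStarts cs) hs' (show t + 1 ≤ u by omega) hu
        omega
      have hmono := pvMonoLe (pvStarts cs) hs' hut (show t < (pvStarts cs).length by omega)
      omega

theorem pvIterB (cs : List Char) (m : Nat) (j : Nat) (hj : j < (pvStarts cs).length) :
    (((pvStepB cs)^[m] ((pvStarts cs).getD j 0).toNat : Nat) : Int) = (pvStarts cs).getD (j - m) 0 := by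
  induction m generalizing j with
  | zero =>
    simp only [Function.iterate_zero, id_eq, Nat.sub_zero]
    have hnn : 0 ≤ (pvStarts cs).getD j 0 := by
      rw [List.getD_eq_getElem _ 0 hj]
      exact pvStarts_nonneg cs _ (List.getElem_mem hj)
    omega
  | succ m ih =>
    rw [Function.iterate_succ_apply]
    have hstep := pvStepB_starts cs j hj
    have hnn : 0 ≤ (pvStarts cs).getD (j - 1) 0 := by
      rw [List.getD_eq_getElem _ 0 (by omega)]
      exact pvStarts_nonneg cs _ (List.getElem_mem (by omega))
    have hnat : pvStepB cs ((pvStarts cs).getD j 0).toNat = ((pvStarts cs).getD (j - 1) 0).toNat := by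
      omega
    rw [hnat, ih (j - 1) (by omega)]
    congr 1
    omega

theorem pvStepB_iter_zero (cs : List Char) (m : Nat) : (pvStepB cs)^[m] 0 = 0 := by
  induction m with
  | zero => rfl
  | succ m ih =>
    rw [Function.iterate_succ_apply]
    have h0 : pvStepB cs 0 = 0 := by simp [pvStepB, pvBackLine]
    rw [h0, ih]

-- A's inner forward scan lands just before the next newline (bisection form)
theorem pvFwdLine_eq (cs : List Char) (j : Nat) (hj : j < cs.length) :
    ((pvFwdLine cs j : Nat) : Int) + 1 =
      (if PySem.List.bisectLeft (pvNls cs) ((j : Int) + 1) < (pvNls cs).length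
       then (pvNls cs).getD (PySem.List.bisectLeft (pvNls cs) ((j : Int) + 1)) 0
       else (cs.length : Int)) := by
  obtain ⟨d, hd⟩ : ∃ d, cs.length - j = d := ⟨_, rfl⟩
  induction d generalizing j with
  | zero => omega
  | succ d ih =>
    rw [pvFwdLine]
    by_cases h1 : j + 1 < cs.length
    · by_cases h2 : cs.getD (j + 1) ' ' ≠ '\n'
      · rw [if_pos ⟨h1, h2⟩]
        rw [ih (j + 1) h1 (by omega)]
        have hnm : ((j : Int) + 1) ∉ pvNls cs := by
          intro hmem
          have := (pvNls_mem cs _).mp hmem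
          rw [show ((j : Int) + 1).toNat = j + 1 by omega] at this
          exact h2 this.2.2
        have hb := bisectLeft_succ_not_mem (pvNls cs) (pvNls_sorted cs) ((j : Int) + 1) hnm
        have hcast : ((j + 1 : Nat) : Int) + 1 = ((j : Int) + 1) + 1 := by push_cast; ring
        rw [hcast, hb]
      · rw [not_not] at h2
        rw [if_neg (fun hC => hC.2 h2)]
        have hmem : ((j : Int) + 1) ∈ pvNls cs :=
          (pvNls_mem cs _).mpr ⟨by omega, by omega,
            by rw [show ((j : Int) + 1).toNat = j + 1 by omega]; exact h2⟩
        obtain ⟨hlt, hget⟩ := bisectLeft_of_mem (pvNls cs) (pvNls_sorted cs) _ hmem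
        rw [if_pos hlt, hget]
    · rw [if_neg (fun hC => h1 hC.1)]
      have hall : ∀ y ∈ pvNls cs, y < (j : Int) + 1 := by
        intro y hy
        have := (pvNls_mem cs y).mp hy
        omega
      rw [bisectLeft_all_lt (pvNls cs) ((pvNls_sorted cs).imp (fun h => le_of_lt h)) _ hall]
      rw [if_neg (lt_irrefl _)]
      omega

theorem pvIterF (cs : List Char) (n : Nat) (hn : 1 ≤ n) (e : Nat) (he : e < cs.length) :
    (((pvStepF cs)^[n] e : Nat) : Int) + 1 =
      (if PySem.List.bisectLeft (pvNls cs) ((e : Int) + 2) + n - 1 < (pvNls cs).length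
       then (pvNls cs).getD (PySem.List.bisectLeft (pvNls cs) ((e : Int) + 2) + n - 1) 0
       else (cs.length : Int)) := by
  induction n, hn using Nat.le_induction with
  | base =>
    rw [Function.iterate_one]
    by_cases h1 : e + 1 < cs.length
    · have hstep : pvStepF cs e = pvFwdLine cs (e + 1) := by
        simp only [pvStepF, if_pos h1]
      rw [hstep]
      have := pvFwdLine_eq cs (e + 1) h1
      rw [show ((e + 1 : Nat) : Int) + 1 = (e : Int) + 2 by push_cast; ring] at this
      rw [this]
      simp only [Nat.add_sub_cancel]
    · have hstep : pvStepF cs e = e := by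
        simp only [pvStepF, if_neg h1]
      rw [hstep]
      have hall : ∀ y ∈ pvNls cs, y < (e : Int) + 2 := by
        intro y hy
        have := (pvNls_mem cs y).mp hy
        omega
      rw [bisectLeft_all_lt (pvNls cs) ((pvNls_sorted cs).imp (fun h => le_of_lt h)) _ hall]
      rw [if_neg (by omega)]
      omega
  | succ n hn ih =>
    rw [Function.iterate_succ_apply']
    by_cases hk : PySem.List.bisectLeft (pvNls cs) ((e : Int) + 2) + n - 1 < (pvNls cs).length
    · rw [if_pos hk] at ih
      have hbound := (pvNls_mem cs _).mp
        (List.getD_eq_getElem (pvNls cs) 0 hk ▸ List.getElem_mem hk)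
      have hq1 : (pvStepF cs)^[n] e + 1 < cs.length := by omega
      have hstep : pvStepF cs ((pvStepF cs)^[n] e) = pvFwdLine cs ((pvStepF cs)^[n] e + 1) := by
        simp only [pvStepF, if_pos hq1]
      rw [hstep]
      have hfwd := pvFwdLine_eq cs ((pvStepF cs)^[n] e + 1) hq1
      rw [show (((pvStepF cs)^[n] e + 1 : Nat) : Int) + 1
            = (pvNls cs).getD (PySem.List.bisectLeft (pvNls cs) ((e : Int) + 2) + n - 1) 0 + 1
          by omega] at hfwd
      rw [bisectLeft_getD_succ (pvNls cs) (pvNls_sorted cs) _ hk] at hfwd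
      rw [show PySem.List.bisectLeft (pvNls cs) ((e : Int) + 2) + n - 1 + 1
            = PySem.List.bisectLeft (pvNls cs) ((e : Int) + 2) + n by omega] at hfwd
      rw [hfwd]
      rw [show PySem.List.bisectLeft (pvNls cs) ((e : Int) + 2) + (n + 1) - 1
            = PySem.List.bisectLeft (pvNls cs) ((e : Int) + 2) + n by omega]
    · rw [if_neg hk] at ih
      have hstep : pvStepF cs ((pvStepF cs)^[n] e) = (pvStepF cs)^[n] e := by
        simp only [pvStepF]
        rw [if_neg (by omega)]
      rw [hstep]
      rw [if_neg (by omega)]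
      exact ih

-- prefix newline count = bisection into the newline table
theorem count_take_eq_bisectLeft (cs : List Char) (m : Nat) :
    ((cs.take m).count '\n' : Nat) = PySem.List.bisectLeft (pvNls cs) (m : Int) := by
  induction m with
  | zero =>
    have h0 : PySem.List.bisectLeft (pvNls cs) ((0 : Nat) : Int) = 0 := by
      apply bisectLeft_eq_of _ _ 0 ((pvNls_sorted cs).imp (fun h => le_of_lt h)) (by omega)
      · intro j hj h
        omega
      · intro j hj _
        have := (pvNls_mem cs _).mp (List.getElem_mem hj)
        omega
    simpa using h0.symm
  | succ m ih =>
    have hcast : ((m + 1 : Nat) : Int) = ((m : Nat) : Int) + 1 := by push_cast; ring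
    by_cases hm : m < cs.length
    · rw [List.take_add_one, List.getElem?_eq_getElem hm, List.count_append]
      by_cases hc : cs[m] = '\n'
      · have hmem : ((m : Nat) : Int) ∈ pvNls cs :=
          (pvNls_mem cs _).mpr ⟨by omega, by exact_mod_cast hm,
            by rw [Int.toNat_natCast, List.getD_eq_getElem cs ' ' hm]; exact hc⟩
        obtain ⟨hlt, hget⟩ := bisectLeft_of_mem (pvNls cs) (pvNls_sorted cs) _ hmem
        have hsucc := bisectLeft_getD_succ (pvNls cs) (pvNls_sorted cs) _ hlt
        rw [hget] at hsucc
        rw [hcast, hsucc]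
        simp [hc, ih]
      · have hnm : ((m : Nat) : Int) ∉ pvNls cs := by
          intro hmem
          have := (pvNls_mem cs _).mp hmem
          rw [Int.toNat_natCast, List.getD_eq_getElem cs ' ' hm] at this
          exact hc this.2.2
        have hb := bisectLeft_succ_not_mem (pvNls cs) (pvNls_sorted cs) _ hnm
        rw [hcast, hb]
        simp [hc, ih]
    · have h1 : cs.take (m + 1) = cs.take m := by
        rw [List.take_of_length_le (by omega), List.take_of_length_le (by omega)]
      have hnm : ((m : Nat) : Int) ∉ pvNls cs := by
        intro hmem
        have := (pvNls_mem cs _).mp hmem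
        omega
      have hb := bisectLeft_succ_not_mem (pvNls cs) (pvNls_sorted cs) _ hnm
      rw [h1, hcast, hb, ih]

theorem foldl_const_iterate {α β : Type} (l : List β) (f : α → α) (x : α) :
    l.foldl (fun i _ => f i) x = f^[l.length] x := by
  induction l generalizing x with
  | nil => rfl
  | cons a t ih => simp [List.foldl_cons, ih, Function.iterate_succ_apply]

-- ===== VERDICT (by name: the statement is the Claim_ definition above) =====
theorem get_lines_around_py_spec : Claim_equal_get_lines_around_py := by
  intro text start end_ n_lines _hdom hpre
  obtain ⟨hp0, hp1, hp2⟩ := hpre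
  have hlen : end_ < (text.toList.length : Int) := by
    simpa [PySem.Str.len_eq] using hp2
  unfold Spec_get_lines_around_py
  simp only [get_lines_around_py, get_lines_around_py_alt]
  rw [if_pos ⟨hp0, hp1, hlen⟩, if_pos ⟨hp0, hp1, hlen⟩]
  set cs := text.toList with hcs
  rw [foldl_const_iterate, foldl_const_iterate, PySem.List.length_pyRange_one]
  simp only [Int.sub_zero]
  have hstart_nn : (0 : Int) ≤ start := hp0
  have hend_nn : (0 : Int) ≤ end_ := le_trans hp0 hp1
  have he_lt : end_.toNat < cs.length := by omega
  by_cases hn : n_lines ≤ 0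
  · -- range(n_lines) is empty
    rw [if_pos hn, if_pos hn]
    rw [show n_lines.toNat = 0 by omega]
    simp only [Function.iterate_zero, id_eq]
    have hsi : ((start.toNat : Nat) : Int) = start := by omega
    have hei : ((end_.toNat + 1 : Nat) : Int) = end_ + 1 := by omega
    rw [hsi, hei]
    simp only [Prod.mk.injEq]
    refine ⟨trivial, trivial, trivial, ?_⟩
    rw [PySem.List.slice_to _ hp0, count_take_eq_bisectLeft, Int.toNat_of_nonneg hp0]
  · rw [if_neg hn, if_neg hn]
    have hn1 : 1 ≤ n_lines.toNat := by omega
    -- forward index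
    have hei : (((pvStepF cs)^[n_lines.toNat] end_.toNat + 1 : Nat) : Int) =
        (if PySem.List.bisectLeft (pvNls cs) (end_ + 2) + n_lines.toNat - 1 < (pvNls cs).length
         then (pvNls cs).getD (PySem.List.bisectLeft (pvNls cs) (end_ + 2) + n_lines.toNat - 1) 0
         else (cs.length : Int)) := by
      have h := pvIterF cs n_lines.toNat hn1 end_.toNat he_lt
      rw [show ((end_.toNat : Nat) : Int) = end_ by omega] at h
      push_cast
      exact h
    -- backward index
    by_cases hz : start = 0
    · rw [if_pos hz]
      have hsi : (((pvStepB cs)^[n_lines.toNat] start.toNat : Nat) : Int) = 0 := by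
        rw [show start.toNat = 0 by omega, pvStepB_iter_zero]
        rfl
      rw [hsi, hei]
      simp only [Prod.mk.injEq]
      refine ⟨trivial, trivial, trivial, ?_⟩
      rw [PySem.List.slice_to _ le_rfl, count_take_eq_bisectLeft]
      norm_num
    · rw [if_neg hz]
      have hs1 : 1 ≤ start.toNat := by omega
      have hbr := pvBR_maxLE (pvStarts cs) (pvStarts_sorted cs) (start - 1)
        ⟨0, (pvStarts_mem cs 0).mpr (Or.inl rfl), by omega⟩
      have hbl := pvBackLine_maxLE cs (start.toNat - 1)
      rw [show ((start.toNat - 1 : Nat) : Int) = start - 1 by omega] at hbl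
      have hval : ((pvBackLine cs (start.toNat - 1) : Nat) : Int) =
          (pvStarts cs).getD (PySem.List.bisectRight (pvStarts cs) (start - 1) - 1) 0 :=
        pvMaxLE_unique (pvStarts cs) (start - 1) _ _ hbl hbr.2
      have hstep : pvStepB cs start.toNat = pvBackLine cs (start.toNat - 1) := by
        unfold pvStepB
        rw [if_pos (by omega)]
      have hsi : (((pvStepB cs)^[n_lines.toNat] start.toNat : Nat) : Int) =
          (pvStarts cs).getD ((PySem.List.bisectRight (pvStarts cs) (start - 1) - 1)
            - (n_lines.toNat - 1)) 0 := by
        rw [show n_lines.toNat = (n_lines.toNat - 1) + 1 by omega, Function.iterate_succ_apply,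
          hstep]
        rw [show pvBackLine cs (start.toNat - 1)
              = ((pvStarts cs).getD (PySem.List.bisectRight (pvStarts cs) (start - 1) - 1) 0).toNat
            by omega]
        exact pvIterB cs (n_lines.toNat - 1) _ hbr.1
      rw [hsi, hei]
      simp only [Prod.mk.injEq]
      refine ⟨trivial, trivial, trivial, ?_⟩
      have hsnn : 0 ≤ (pvStarts cs).getD ((PySem.List.bisectRight (pvStarts cs) (start - 1) - 1)
          - (n_lines.toNat - 1)) 0 := by omega
      rw [PySem.List.slice_to _ hsnn, count_take_eq_bisectLeft, Int.toNat_of_nonneg hsnn]
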